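-- pv_equiv track=rewrite | github.com/vsmart/touchpad | touch.py | split_in_pairs
-- ===== SOURCE A (Python) =====
-- def split_in_pairs(word):
-- 	num = len(word) - 1
-- 	i = 0
-- 	pairs = [''] * num
-- 	while (i < num):
-- 		pairs[i] = word[i:(i+2)]
-- 		i += 1
-- 	return pairs
-- ===== SOURCE B (Python) =====
-- def split_in_pairs(word):
-- 	pairs = []
-- 	for i in range(len(word) - 1, 0, -1):
-- 		pairs.append(word[i - 1] + word[i])
-- 	pairs.reverse()
-- 	return pairs
-- ===== Notes on version B (the rewrite author's own statement) =====
-- stated objective: alternative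
-- what changed: B builds the pair list back-to-front: it walks the indices from the end of the word down to 1, appends each pair made by concatenating the two individual characters, and reverses the accumulated list at the end, instead of A's forward while loop writing length-2 slices into a preallocated list by index.
import Mathlib
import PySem

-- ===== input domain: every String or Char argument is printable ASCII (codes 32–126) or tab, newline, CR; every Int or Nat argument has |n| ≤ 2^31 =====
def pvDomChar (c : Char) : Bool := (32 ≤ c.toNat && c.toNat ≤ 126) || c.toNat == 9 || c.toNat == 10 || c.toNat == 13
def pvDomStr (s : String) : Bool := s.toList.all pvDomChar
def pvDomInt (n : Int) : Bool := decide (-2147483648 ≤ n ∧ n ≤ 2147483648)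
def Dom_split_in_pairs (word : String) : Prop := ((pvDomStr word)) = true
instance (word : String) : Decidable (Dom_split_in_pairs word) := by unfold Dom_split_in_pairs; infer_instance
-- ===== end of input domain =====

-- B builds the pair list back-to-front (countdown loop appending character
-- concatenations, then one reverse) instead of A's forward index loop writing
-- length-2 slices into a preallocated list.


-- ===== PORT A =====
def split_in_pairs (word : String) : List String :=
  let num : Int := PySem.Str.len word - 1
  let pairs : List String := List.replicate num.toNat ""
  (PySem.List.pyRange 0 num 1).foldl
    (fun pairs i =>
      PySem.List.pySetD pairs i
        (String.ofList (PySem.List.slice word.toList (some i) (some (i + 2)))))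
    pairs

-- ===== PORT B =====
-- word[i-1] + word[i]: both indices lie in range for every i produced by the
-- countdown range, so pyGetD on the char list is exact here.
def split_in_pairs_alt (word : String) : List String :=
  let cs := word.toList
  let pairs : List String :=
    (PySem.List.pyRange (PySem.Str.len word - 1) 0 (-1)).foldl
      (fun pairs i =>
        pairs ++ [String.ofList [PySem.List.pyGetD cs (i - 1) ' ',
                                 PySem.List.pyGetD cs i ' ']])
      []
  pairs.reverse

-- ===== PRECONDITION & SPEC =====
def Spec_split_in_pairs (word : String) (out : List String) : Prop := out = split_in_pairs_alt word
instance (word : String) (out : List String) : Decidable (Spec_split_in_pairs word out) := by unfold Spec_split_in_pairs; infer_instance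

-- ===== CLAIM (what is proved, stated in full; the proofs are below) =====
def Claim_equal_split_in_pairs : Prop := ∀ (word : String), Dom_split_in_pairs word → Spec_split_in_pairs word (split_in_pairs word)

-- ===== LEMMAS AND PROOFS =====

/-- A's while loop: filling positions k..k+n-1 of a prefix-plus-blanks list yields the mapped range. -/
lemma pv_fill (g : Int → String) (d : String) :
    ∀ (n k M : Nat), M = k + n →
    (PySem.List.pyRange (k : Int) (M : Int) 1).foldl
      (fun acc i => PySem.List.pySetD acc i (g i))
      ((List.range k).map (fun j : Nat => g (j : Int)) ++ List.replicate n d)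
    = (List.range M).map (fun j : Nat => g (j : Int)) := by
  intro n
  induction n with
  | zero =>
    intro k M hM
    subst hM
    rw [PySem.List.pyRange_one_eq_nil (by omega)]
    simp
  | succ n ih =>
    intro k M hM
    rw [PySem.List.pyRange_one_cons (by omega : (k : Int) < (M : Int))]
    simp only [List.foldl_cons]
    have hset : PySem.List.pySetD
        ((List.range k).map (fun j : Nat => g (j : Int)) ++ List.replicate (n + 1) d)
        (k : Int) (g k)
        = (List.range (k + 1)).map (fun j : Nat => g (j : Int)) ++ List.replicate n d := by
      rw [PySem.List.pySetD_natCast]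
      have : ((List.range k).map (fun j : Nat => g (j : Int))).length = k := by simp
      rw [List.range_succ]
      simp [List.replicate_succ]
    rw [hset]
    have hcast : ((k : Int) + 1) = (((k + 1 : Nat) : Int)) := by push_cast; ring
    rw [hcast]
    exact ih (k + 1) M (by omega)

/-- Folding with append-of-singleton is map (generalised over the accumulator). -/
lemma pv_foldl_append {α β : Type} (g : α → β) :
    ∀ (l : List α) (init : List β),
      l.foldl (fun acc i => acc ++ [g i]) init = init ++ l.map g := by
  intro l
  induction l with
  | nil => simp
  | cons a t ih => intro init; simp [ih]

/-- Reversing a mapped range re-indexes it. -/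
lemma pv_rev_map_range {α : Type} (m : Nat) (f : Nat → α) :
    ((List.range m).map f).reverse = (List.range m).map (fun k => f (m - 1 - k)) := by
  apply List.ext_getElem
  · simp
  · intro i h1 h2
    simp only [List.length_map, List.length_reverse, List.length_range] at h1 h2
    simp [List.getElem_reverse, List.getElem_map, List.getElem_range]

/-- The two-character window at an in-range index is the explicit char pair. -/
lemma pv_window : ∀ (j : Nat) (cs : List Char), j + 1 < cs.length →
    (cs.drop j).take 2 = [cs.getD j ' ', cs.getD (j + 1) ' '] := by
  intro j
  induction j with
  | zero =>
    intro cs h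
    match cs, h with
    | a :: b :: t, _ => simp
  | succ n ih =>
    intro cs h
    match cs, h with
    | a :: t, h =>
      simp only [List.drop_succ_cons, List.getD_cons_succ]
      exact ih t (by simpa using h)

/-- A's slice at a natural index is the two-character window. -/
lemma pv_slice (cs : List Char) (j : Nat) :
    PySem.List.slice cs (some (j : Int)) (some ((j : Int) + 2)) = (cs.drop j).take 2 := by
  have h := PySem.List.slice_natCast_add (xs := cs) (j := j) (n := 2)
  have : ((j : Int) + 2) = ((j : Int) + ((2 : Nat) : Int)) := by push_cast; ring
  rw [this]
  exact h

/-- B computes the range of length-2 windows. -/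
lemma pv_alt (word : String) :
    split_in_pairs_alt word
    = (List.range (word.toList.length - 1)).map
        (fun j => String.ofList ((word.toList.drop j).take 2)) := by
  unfold split_in_pairs_alt
  simp only [PySem.Str.len_eq]
  cases hcs : word.toList with
  | nil =>
    rw [PySem.List.pyRange_neg_one_eq_nil (by simp)]
    simp
  | cons a rest =>
    set cs : List Char := a :: rest with hcsdef
    set m : Nat := rest.length with hm
    have hlen : cs.length = m + 1 := by simp [hcsdef, hm]
    have hcast : ((cs.length : Int) - 1) = ((m : Nat) : Int) := by
      rw [hlen]; push_cast; ring
    rw [hcast, PySem.List.pyRange_neg_one]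
    have : (((m : Nat) : Int) - 0).toNat = m := by omega
    rw [this, pv_foldl_append, List.nil_append, List.map_map,
        pv_rev_map_range, hlen]
    simp only [Nat.add_sub_cancel]
    apply List.map_congr_left
    intro k hk
    simp only [List.mem_range] at hk
    have h1 : ((m : Int) - ((m - 1 - k : Nat) : Int)) = ((k + 1 : Nat) : Int) := by omega
    simp only [Function.comp, h1]
    have h2 : (((k + 1 : Nat) : Int) - 1) = ((k : Nat) : Int) := by omega
    rw [h2, PySem.List.pyGetD_natCast, PySem.List.pyGetD_natCast,
        pv_window k cs (by simp [hlen]; omega)]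

-- ===== VERDICT (by name: the statement is the Claim_ definition above) =====
theorem split_in_pairs_spec : Claim_equal_split_in_pairs := by
  intro word _
  unfold Spec_split_in_pairs
  rw [pv_alt]
  unfold split_in_pairs
  simp only [PySem.Str.len_eq]
  cases hcs : word.toList with
  | nil =>
    rw [PySem.List.pyRange_one_eq_nil (by simp)]
    simp
  | cons a rest =>
    have hlen : (((a :: rest).length : Int) - 1) = ((rest.length : Nat) : Int) := by
      simp
    rw [hlen, Int.toNat_natCast]
    have hl : (a :: rest).length - 1 = rest.length := by simp
    rw [hl]
    have hfill := pv_fill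
      (fun i => String.ofList (PySem.List.slice (a :: rest) (some i) (some (i + 2)))) ""
      rest.length 0 rest.length (by omega)
    exact Eq.trans hfill (List.map_congr_left fun j _ =>
      congrArg String.ofList (pv_slice (a :: rest) j))
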